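-- pv_equiv track=rewrite | github.com/davgav01/leetcode-solutions | 10_regular_expression_matching.py | reduce_p
-- ===== SOURCE A (Python) =====
-- def reduce_p(p):
--     new_p = ""
--     p_temp = p + "  "
--     i = 0
--     current_star = ""
--     while i < len(p):
--         if p_temp[i + 1] != "*":
--             new_p += p_temp[i]
--             current_star = ""
--             i += 1
--             continue
--         elif current_star == p_temp[i] or current_star == ".":
--             i += 2
--             continue
--         elif p_temp[i] == "." and current_star != "":
--             new_p = new_p[:-2]
--
--         new_p += p_temp[i]
--         new_p += p_temp[i + 1]
--         current_star = p_temp[i]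
--         i += 2
--     return new_p
-- ===== SOURCE B (Python) =====
-- def reduce_p(p):
--     n = len(p)
--     out = []
--     i = 0
--     while i < n:
--         if i + 1 < n and p[i + 1] == "*":
--             # collect one maximal run of starred chars, deduping adjacent repeats
--             run = []
--             while i + 1 < n and p[i + 1] == "*":
--                 c = p[i]
--                 if not run or run[-1] != c:
--                     run.append(c)
--                 i += 2
--             # closed form: from one token before the first '.' onwards, the run collapses to '.'
--             if "." in run:
--                 j = run.index(".")
--                 run = run[:j - 1 if j > 0 else 0] + ["."]
--             out.append("".join(c + "*" for c in run))
--         else: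
--             out.append(p[i])
--             i += 1
--     return "".join(out)
-- ===== Notes on version B (the rewrite author's own statement) =====
-- stated objective: alternative
-- what changed: Replaces A's single stateful scan (current_star register plus in-place new_p[:-2] surgery on the growing output string) with a run-based closed form: split the pattern into maximal runs of starred characters, adjacent-dedupe each run while collecting it, and collapse each run by cutting it one token before its first dot and ending it with a dot-star, so there is no cross-token star state and no popping of already-emitted output.
import Mathlib
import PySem

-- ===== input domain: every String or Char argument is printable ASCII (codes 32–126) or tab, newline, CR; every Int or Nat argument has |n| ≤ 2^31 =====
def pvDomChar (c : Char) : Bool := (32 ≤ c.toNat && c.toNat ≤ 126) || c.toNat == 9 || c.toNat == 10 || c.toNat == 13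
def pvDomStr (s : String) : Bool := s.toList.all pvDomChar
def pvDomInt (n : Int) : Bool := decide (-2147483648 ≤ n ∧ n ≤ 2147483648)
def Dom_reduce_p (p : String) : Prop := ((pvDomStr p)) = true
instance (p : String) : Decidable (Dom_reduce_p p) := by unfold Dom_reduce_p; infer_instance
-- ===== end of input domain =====

-- B replaces A's stateful scan (current_star register + new_p[:-2] surgery) by a run-based
-- closed form over maximal star-runs (objective: alternative decomposition).

-- ===== PORT A =====
-- while loop of A: state = (i, new_p, current_star); current_star is "" or a 1-char string,
-- modelled as a List Char that is [] or [c]; p_temp is the padded list l ++ [' ', ' '].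
def reduce_p_loop (pt : List Char) (n : Nat) (i : Nat) (newp : List Char) (cur : List Char) : List Char :=
  if i < n then
    if pt.getD (i + 1) ' ' ≠ '*' then
      reduce_p_loop pt n (i + 1) (newp ++ [pt.getD i ' ']) []
    else if cur = [pt.getD i ' '] ∨ cur = ['.'] then
      reduce_p_loop pt n (i + 2) newp cur
    else
      let newp' := if pt.getD i ' ' = '.' ∧ cur ≠ [] then newp.take (newp.length - 2) else newp
      reduce_p_loop pt n (i + 2) (newp' ++ [pt.getD i ' ', pt.getD (i + 1) ' ']) [pt.getD i ' ']
  else newp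
termination_by n - i
decreasing_by all_goals omega

def reduce_p (p : String) : String :=
  String.mk (reduce_p_loop (p.toList ++ [' ', ' ']) p.toList.length 0 [] [])

-- ===== PORT B =====
-- "".join(c + "*" for c in run)
def pvEnc (run : List Char) : List Char := run.flatMap (fun c => [c, '*'])

-- the 'if "." in run: j = run.index("."); run = run[:j-1 if j>0 else 0] + ["."]' block
def pvFix (run : List Char) : List Char :=
  if '.' ∈ run then
    (run.take (if run.idxOf '.' > 0 then run.idxOf '.' - 1 else 0)) ++ ['.']
  else run

-- inner while loop of B: collect one maximal run of starred chars, deduping adjacent repeats;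
-- returns (run, new i); the structural fuel only bounds the iteration count (fuel = n always suffices:
-- each step needs i + 1 < n and advances i by 2)
def pvCollect (l : List Char) (n : Nat) : Nat → Nat → List Char → List Char × Nat
  | 0, i, run => (run, i)
  | fuel + 1, i, run =>
    if i + 1 < n ∧ l.getD (i + 1) ' ' = '*' then
      let c := l.getD i ' '
      pvCollect l n fuel (i + 2) (if run = [] ∨ run.getLast? ≠ some c then run ++ [c] else run)
    else (run, i)

-- outer while loop of B (fuel = n suffices: every iteration needs i < n and advances i)
def pvMain (l : List Char) (n : Nat) : Nat → Nat → List (List Char) → List Char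
  | 0, _, out => out.flatten
  | fuel + 1, i, out =>
    if i < n then
      if i + 1 < n ∧ l.getD (i + 1) ' ' = '*' then
        let r := pvCollect l n n i []
        pvMain l n fuel r.2 (out ++ [pvEnc (pvFix r.1)])
      else pvMain l n fuel (i + 1) (out ++ [[l.getD i ' ']])
    else out.flatten

def reduce_p_alt (p : String) : String :=
  String.mk (pvMain p.toList p.toList.length p.toList.length 0 [])

-- ===== PRECONDITION & SPEC =====
def Spec_reduce_p (p : String) (out : String) : Prop := out = reduce_p_alt p
instance (p : String) (out : String) : Decidable (Spec_reduce_p p out) := by unfold Spec_reduce_p; infer_instance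

-- ===== CLAIM (what is proved, stated in full; the proofs are below) =====
def Claim_equal_reduce_p : Prop := ∀ (p : String), Dom_reduce_p p → Spec_reduce_p p (reduce_p p)

-- ===== LEMMAS AND PROOFS =====

-- well-founded (index-driven) reformulations of B's loops, used only by the proofs
def pvCollectW (l : List Char) (n : Nat) (i : Nat) (run : List Char) : List Char × Nat :=
  if i + 1 < n ∧ l.getD (i + 1) ' ' = '*' then
    let c := l.getD i ' '
    pvCollectW l n (i + 2) (if run = [] ∨ run.getLast? ≠ some c then run ++ [c] else run)
  else (run, i)
termination_by n - i
decreasing_by omega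

theorem pvCollectW_ge (l : List Char) (n i : Nat) (run : List Char) :
    i ≤ (pvCollectW l n i run).2 := by
  rw [pvCollectW]
  split
  · next h => exact le_trans (by omega) (pvCollectW_ge l n (i + 2) _)
  · exact le_refl i
termination_by n - i
decreasing_by omega

theorem pvCollectW_ge2 (l : List Char) (n i : Nat) (run : List Char)
    (h : i + 1 < n ∧ l.getD (i + 1) ' ' = '*') : i + 2 ≤ (pvCollectW l n i run).2 := by
  rw [pvCollectW, if_pos h]
  exact le_trans (le_refl _) (pvCollectW_ge l n (i + 2) _)

def pvMainW (l : List Char) (n : Nat) (i : Nat) (out : List (List Char)) : List Char :=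
  if i < n then
    if h : i + 1 < n ∧ l.getD (i + 1) ' ' = '*' then
      let r := pvCollectW l n i []
      pvMainW l n r.2 (out ++ [pvEnc (pvFix r.1)])
    else pvMainW l n (i + 1) (out ++ [[l.getD i ' ']])
  else out.flatten
termination_by n - i
decreasing_by
  · have h2 := pvCollectW_ge2 l n i [] h
    omega
  · omega

-- the fuelled port computes the well-founded reformulation whenever the fuel covers the remaining input
theorem pvCollect_fuel_eq (l : List Char) (n : Nat) :
    ∀ (f i : Nat) (run : List Char), n ≤ i + 1 + f →
      pvCollect l n f i run = pvCollectW l n i run := by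
  intro f
  induction f with
  | zero =>
    intro i run h
    rw [pvCollectW, if_neg (by rintro ⟨h1, _⟩; omega)]
    rfl
  | succ f ih =>
    intro i run h
    rw [pvCollectW]
    by_cases hs : i + 1 < n ∧ l.getD (i + 1) ' ' = '*'
    · simp only [pvCollect]
      rw [if_pos hs, if_pos hs]
      exact ih (i + 2) _ (by omega)
    · simp only [pvCollect]
      rw [if_neg hs, if_neg hs]

theorem pvMain_fuel_eq (l : List Char) (n : Nat) :
    ∀ (f i : Nat) (out : List (List Char)), n ≤ i + f →
      pvMain l n f i out = pvMainW l n i out := by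
  intro f
  induction f with
  | zero =>
    intro i out h
    rw [pvMainW, if_neg (by omega)]
    rfl
  | succ f ih =>
    intro i out h
    by_cases hi : i < n
    · rw [pvMainW, if_pos hi]
      by_cases hs : i + 1 < n ∧ l.getD (i + 1) ' ' = '*'
      · simp only [pvMain]
        rw [if_pos hi, dif_pos hs, if_pos hs]
        rw [pvCollect_fuel_eq l n n i [] (by omega)]
        exact ih (pvCollectW l n i []).2 _
          (by have := pvCollectW_ge2 l n i [] hs; omega)
      · simp only [pvMain]
        rw [if_pos hi, dif_neg hs, if_neg hs]
        exact ih (i + 1) _ (by omega)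
    · simp only [pvMain]
      rw [if_neg hi, pvMainW, if_neg hi]


-- A's current_star as a function of the deduped run collected so far
def pvCur (run : List Char) : List Char :=
  if '.' ∈ run then ['.']
  else match run.getLast? with
    | some c => [c]
    | none => []

-- step equations for A's loop
theorem loop_done (pt : List Char) (n i : Nat) (newp cur : List Char) (h : ¬ i < n) :
    reduce_p_loop pt n i newp cur = newp := by
  rw [reduce_p_loop]; simp [h]

theorem loop_single (pt : List Char) (n i : Nat) (newp cur : List Char) (h : i < n)
    (h1 : pt.getD (i + 1) ' ' ≠ '*') :
    reduce_p_loop pt n i newp cur = reduce_p_loop pt n (i + 1) (newp ++ [pt.getD i ' ']) [] := by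
  rw [reduce_p_loop]; simp only [List.getD] at h1 ⊢; simp [h, h1]

theorem loop_skip (pt : List Char) (n i : Nat) (newp cur : List Char) (h : i < n)
    (h1 : pt.getD (i + 1) ' ' = '*') (h2 : cur = [pt.getD i ' '] ∨ cur = ['.']) :
    reduce_p_loop pt n i newp cur = reduce_p_loop pt n (i + 2) newp cur := by
  rw [reduce_p_loop]; simp only [List.getD] at h1 h2 ⊢; simp [h, h1, h2]

theorem loop_star (pt : List Char) (n i : Nat) (newp cur : List Char) (h : i < n)
    (h1 : pt.getD (i + 1) ' ' = '*') (h2 : ¬ (cur = [pt.getD i ' '] ∨ cur = ['.'])) :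
    reduce_p_loop pt n i newp cur =
      reduce_p_loop pt n (i + 2)
        ((if pt.getD i ' ' = '.' ∧ cur ≠ [] then newp.take (newp.length - 2) else newp)
          ++ [pt.getD i ' ', pt.getD (i + 1) ' ']) [pt.getD i ' '] := by
  rw [reduce_p_loop]
  simp only [List.getD] at h1 h2 ⊢
  simp [h, h1, h2]

-- step equations for B's loops
theorem collect_step (l : List Char) (n i : Nat) (run : List Char)
    (h : i + 1 < n ∧ l.getD (i + 1) ' ' = '*') :
    pvCollectW l n i run =
      pvCollectW l n (i + 2)
        (if run = [] ∨ run.getLast? ≠ some (l.getD i ' ') then run ++ [l.getD i ' '] else run) := by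
  rw [pvCollectW, if_pos h]

theorem collect_done (l : List Char) (n i : Nat) (run : List Char)
    (h : ¬ (i + 1 < n ∧ l.getD (i + 1) ' ' = '*')) :
    pvCollectW l n i run = (run, i) := by
  rw [pvCollectW, if_neg h]

theorem main_done (l : List Char) (n i : Nat) (out : List (List Char)) (h : ¬ i < n) :
    pvMainW l n i out = out.flatten := by
  rw [pvMainW, if_neg h]

theorem main_star (l : List Char) (n i : Nat) (out : List (List Char)) (h : i < n)
    (hs : i + 1 < n ∧ l.getD (i + 1) ' ' = '*') :
    pvMainW l n i out =
      pvMainW l n (pvCollectW l n i []).2 (out ++ [pvEnc (pvFix (pvCollectW l n i []).1)]) := by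
  rw [pvMainW, if_pos h, dif_pos hs]

theorem main_single (l : List Char) (n i : Nat) (out : List (List Char)) (h : i < n)
    (hs : ¬ (i + 1 < n ∧ l.getD (i + 1) ' ' = '*')) :
    pvMainW l n i out = pvMainW l n (i + 1) (out ++ [[l.getD i ' ']]) := by
  rw [pvMainW, if_pos h, dif_neg hs]

-- accumulator property of B's outer loop
theorem pvMain_acc (l : List Char) (n i : Nat) (out : List (List Char)) :
    pvMainW l n i out = out.flatten ++ pvMainW l n i [] := by
  by_cases hlt : i < n
  · by_cases hs : i + 1 < n ∧ l.getD (i + 1) ' ' = '*'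
    · rw [main_star l n i out hlt hs, main_star l n i [] hlt hs,
        pvMain_acc l n (pvCollectW l n i []).2 (out ++ [pvEnc (pvFix (pvCollectW l n i []).1)]),
        pvMain_acc l n (pvCollectW l n i []).2 ([] ++ [pvEnc (pvFix (pvCollectW l n i []).1)])]
      simp
    · rw [main_single l n i out hlt hs, main_single l n i [] hlt hs,
        pvMain_acc l n (i + 1) (out ++ [[l.getD i ' ']]),
        pvMain_acc l n (i + 1) ([] ++ [[l.getD i ' ']])]
      simp
  · rw [main_done l n i out hlt, main_done l n i [] hlt]; simp
termination_by n - i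
decreasing_by
  · have := pvCollectW_ge2 l n i [] hs; omega
  · have := pvCollectW_ge2 l n i [] hs; omega
  · omega
  · omega

-- B's continuation from any position folds back into the outer loop
theorem pvMain_unfold_run (l : List Char) (n j : Nat) :
    pvEnc (pvFix (pvCollectW l n j []).1) ++ pvMainW l n (pvCollectW l n j []).2 []
      = pvMainW l n j [] := by
  by_cases hlt : j < n
  · by_cases hs : j + 1 < n ∧ l.getD (j + 1) ' ' = '*'
    · rw [main_star l n j [] hlt hs,
        pvMain_acc l n (pvCollectW l n j []).2 ([] ++ [pvEnc (pvFix (pvCollectW l n j []).1)])]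
      simp
    · rw [collect_done _ _ _ _ hs]
      simp [pvFix, pvEnc]
  · have hs : ¬ (j + 1 < n ∧ l.getD (j + 1) ' ' = '*') := by rintro ⟨h1, _⟩; omega
    rw [collect_done _ _ _ _ hs]
    simp [pvFix, pvEnc]

-- pvEnc and pvFix facts
theorem enc_append (xs ys : List Char) : pvEnc (xs ++ ys) = pvEnc xs ++ pvEnc ys := by
  simp [pvEnc]

theorem fix_nil : pvFix [] = [] := by simp [pvFix]

theorem fix_no_dot (run : List Char) (h : '.' ∉ run) : pvFix run = run := by
  simp [pvFix, h]

theorem fix_append_dot_mem (run : List Char) (c : Char) (h : '.' ∈ run) :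
    pvFix (run ++ [c]) = pvFix run := by
  have hm : '.' ∈ run ++ [c] := List.mem_append_left _ h
  have hidx : (run ++ [c]).idxOf '.' = run.idxOf '.' := List.idxOf_append_of_mem h
  have hlt : run.idxOf '.' < run.length := List.idxOf_lt_length_of_mem h
  unfold pvFix
  rw [if_pos hm, if_pos h, hidx,
    List.take_append_of_le_length (by split <;> omega)]

theorem fix_append_dot_new (run : List Char) (h : '.' ∉ run) :
    pvFix (run ++ ['.']) = run.dropLast ++ ['.'] := by
  have hm : '.' ∈ run ++ ['.'] := by simp
  have hidx : (run ++ ['.']).idxOf '.' = run.length := by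
    rw [List.idxOf_append_of_notMem h]; simp
  unfold pvFix
  rw [if_pos hm, hidx]
  rcases Nat.eq_zero_or_pos run.length with h0 | h0
  · have hrnil : run = [] := List.eq_nil_of_length_eq_zero h0
    subst hrnil; simp
  · have hcond : (if run.length > 0 then run.length - 1 else 0) = run.length - 1 := by
      split <;> omega
    rw [hcond, List.take_append_of_le_length (by omega), ← List.dropLast_eq_take]

-- pvCur facts
theorem cur_nil : pvCur [] = [] := by simp [pvCur]

theorem cur_ne_nil (run : List Char) (h : run ≠ []) : pvCur run ≠ [] := by
  unfold pvCur
  split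
  · simp
  · rcases hg : run.getLast? with _ | c
    · exact absurd (List.getLast?_eq_none_iff.mp hg) h
    · simp

theorem cur_dot_mem (run : List Char) (h : pvCur run = ['.']) : '.' ∈ run := by
  unfold pvCur at h
  split at h
  · assumption
  · next hnd =>
    rcases hg : run.getLast? with _ | c
    · rw [hg] at h; simp at h
    · rw [hg] at h
      simp at h
      subst h
      exact absurd (List.mem_of_getLast? hg) hnd

theorem cur_append (run : List Char) (c : Char) :
    pvCur (run ++ [c]) = if '.' ∈ run ∨ c = '.' then ['.'] else [c] := by
  unfold pvCur
  have hg : (run ++ [c]).getLast? = some c := List.getLast?_concat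
  have hm : ('.' ∈ run ++ [c]) ↔ ('.' ∈ run ∨ c = '.') := by
    simp [List.mem_append, eq_comm]
  split
  · next hd => rw [if_pos (hm.mp hd)]
  · next hd =>
    rw [if_neg (fun hh => hd (hm.mpr hh)), hg]

-- the new_p[:-2] pop removes exactly the last emitted star token
theorem take_pop (newp0 run : List Char) (hr : run ≠ []) :
    (newp0 ++ pvEnc run).take ((newp0 ++ pvEnc run).length - 2)
      = newp0 ++ pvEnc run.dropLast := by
  conv_lhs => rw [← List.dropLast_append_getLast hr]
  rw [enc_append]
  have henc : pvEnc [run.getLast hr] = [run.getLast hr, '*'] := by simp [pvEnc]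
  rw [henc, ← List.append_assoc]
  have hlen : (newp0 ++ pvEnc run.dropLast ++ [run.getLast hr, '*']).length
      = (newp0 ++ pvEnc run.dropLast).length + 2 := by simp; omega
  rw [hlen]
  have h2 : (newp0 ++ pvEnc run.dropLast).length + 2 - 2
      = (newp0 ++ pvEnc run.dropLast).length := by omega
  rw [h2, List.take_left]

-- padded lookups
theorem getD_pad_lt (l : List Char) (i : Nat) (h : i < l.length) :
    (l ++ [' ', ' ']).getD i ' ' = l.getD i ' ' := by
  rw [List.getD_append _ _ _ _ h]

theorem getD_pad_ge (l : List Char) (i : Nat) (h : l.length ≤ i) :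
    (l ++ [' ', ' ']).getD i ' ' = ' ' := by
  rw [List.getD_append_right _ _ _ _ h]
  rcases hk : i - l.length with _ | _ | k <;> simp [List.getD]

-- the main bridge: A's loop from a mid-run state equals B's continuation
theorem bridge (l : List Char) :
    ∀ (k i : Nat) (run newp0 : List Char), l.length ≤ i + k →
    reduce_p_loop (l ++ [' ', ' ']) l.length i (newp0 ++ pvEnc (pvFix run)) (pvCur run)
      = newp0 ++ pvEnc (pvFix (pvCollectW l l.length i run).1)
          ++ pvMainW l l.length (pvCollectW l l.length i run).2 [] := by
  intro k
  induction k with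
  | zero =>
    intro i run newp0 hk
    have hi : ¬ i < l.length := by omega
    have hs : ¬ (i + 1 < l.length ∧ l.getD (i + 1) ' ' = '*') := by
      rintro ⟨h1, _⟩; omega
    rw [loop_done _ _ _ _ _ hi, collect_done _ _ _ _ hs, main_done _ _ _ _ hi]
    simp
  | succ k ih =>
    intro i run newp0 hk
    by_cases hi : i < l.length
    · by_cases hs : i + 1 < l.length ∧ l.getD (i + 1) ' ' = '*'
      · -- star token at position i
        obtain ⟨h1, h2⟩ := hs
        have hgi : (l ++ [' ', ' ']).getD i ' ' = l.getD i ' ' := getD_pad_lt l i hi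
        have hgi1 : (l ++ [' ', ' ']).getD (i + 1) ' ' = '*' := by
          rw [getD_pad_lt l (i + 1) h1]; exact h2
        rw [collect_step _ _ _ _ ⟨h1, h2⟩]
        by_cases hskip : pvCur run = [l.getD i ' '] ∨ pvCur run = ['.']
        · -- A skips; B's dedup keeps the fix and cur unchanged
          rw [loop_skip _ _ _ _ _ hi hgi1 (by rw [hgi]; exact hskip)]
          set run' := if run = [] ∨ run.getLast? ≠ some (l.getD i ' ')
            then run ++ [l.getD i ' '] else run with hrun'
          have hpres : pvFix run' = pvFix run ∧ pvCur run' = pvCur run := by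
            by_cases hm : '.' ∈ run
            · rw [hrun']
              split
              · exact ⟨fix_append_dot_mem run _ hm,
                  by rw [cur_append, if_pos (Or.inl hm)]
                     unfold pvCur; rw [if_pos hm]⟩
              · exact ⟨rfl, rfl⟩
            · have hcur : pvCur run = [l.getD i ' '] := by
                rcases hskip with h | h
                · exact h
                · exact absurd (cur_dot_mem run h) hm
              have hlast : run.getLast? = some (l.getD i ' ') := by
                unfold pvCur at hcur
                rw [if_neg hm] at hcur
                rcases hg : run.getLast? with _ | c
                · rw [hg] at hcur; simp at hcur
                · rw [hg] at hcur
                  simp at hcur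
                  rw [hcur]
                  simp [List.getD]
              have hne : run ≠ [] := by
                intro hh; rw [hh] at hlast; simp at hlast
              rw [hrun', if_neg (by simp [hne, hlast])]
              exact ⟨rfl, rfl⟩
          rw [← hpres.1, ← hpres.2]
          exact ih (i + 2) run' newp0 (by omega)
        · -- A emits (possibly popping); B's dedup appends
          rw [loop_star _ _ _ _ _ hi hgi1 (by rw [hgi]; exact hskip)]
          have hm : '.' ∉ run := fun hd => hskip (Or.inr (by unfold pvCur; rw [if_pos hd]))
          have hlast : run.getLast? ≠ some (l.getD i ' ') := by
            intro hg
            exact hskip (Or.inl (by unfold pvCur; rw [if_neg hm, hg]))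
          rw [if_pos (Or.inr hlast)]
          rw [hgi, hgi1, fix_no_dot run hm]
          by_cases hpop : l.getD i ' ' = '.' ∧ pvCur run ≠ []
          · -- pop branch: c = '.', run ≠ []
            have hrne : run ≠ [] := by
              intro hh; rw [hh, cur_nil] at hpop; exact hpop.2 rfl
            rw [if_pos hpop, take_pop newp0 run hrne, hpop.1]
            have hfix : pvFix (run ++ ['.']) = run.dropLast ++ ['.'] :=
              fix_append_dot_new run hm
            have hcur : pvCur (run ++ ['.']) = ['.'] := by
              rw [cur_append, if_pos (Or.inr rfl)]
            have hnew : newp0 ++ pvEnc run.dropLast ++ ['.', '*']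
                = newp0 ++ pvEnc (pvFix (run ++ ['.'])) := by
              rw [hfix, enc_append]
              simp [pvEnc]
            have H := ih (i + 2) (run ++ ['.']) newp0 (by omega)
            rw [hcur] at H
            rw [hnew]
            exact H
          · -- plain emit: no pop
            rw [if_neg hpop]
            have hfix : pvFix (run ++ [l.getD i ' ']) = run ++ [l.getD i ' '] := by
              by_cases hc : l.getD i ' ' = '.'
              · have hrnil : run = [] := by
                  by_contra hh
                  exact hpop ⟨hc, cur_ne_nil run hh⟩
                subst hrnil
                rw [hc, fix_append_dot_new [] (by simp)]
                simp
              · exact fix_no_dot _ (by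
                  intro hd
                  rcases List.mem_append.mp hd with hd | hd
                  · exact hm hd
                  · simp at hd; exact hc hd.symm)
            have hcur : pvCur (run ++ [l.getD i ' ']) = [l.getD i ' '] := by
              rw [cur_append]
              split
              · next hd =>
                rcases hd with hd | hd
                · exact absurd hd hm
                · rw [hd]
              · rfl
            have hnew : newp0 ++ pvEnc run ++ [l.getD i ' ', '*']
                = newp0 ++ pvEnc (pvFix (run ++ [l.getD i ' '])) := by
              rw [hfix, enc_append]
              simp [pvEnc]
            have H := ih (i + 2) (run ++ [l.getD i ' ']) newp0 (by omega)
            rw [hcur] at H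
            rw [hnew]
            exact H
      · -- single char at position i
        have hne : (l ++ [' ', ' ']).getD (i + 1) ' ' ≠ '*' := by
          by_cases h1 : i + 1 < l.length
          · rw [getD_pad_lt l (i + 1) h1]
            intro hh; exact hs ⟨h1, hh⟩
          · rw [getD_pad_ge l (i + 1) (by omega)]
            decide
        rw [loop_single _ _ _ _ _ hi hne, collect_done _ _ _ _ hs]
        have hgi : (l ++ [' ', ' ']).getD i ' ' = l.getD i ' ' := getD_pad_lt l i hi
        rw [hgi]
        have step := ih (i + 1) [] (newp0 ++ pvEnc (pvFix run) ++ [l.getD i ' ']) (by omega)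
        rw [fix_nil, cur_nil] at step
        have henc0 : pvEnc ([] : List Char) = [] := by simp [pvEnc]
        rw [henc0, List.append_nil] at step
        rw [step]
        -- fold B's continuation at i+1 back into pvMainW l n i []
        have hmain : pvMainW l l.length i [] = [l.getD i ' '] ++ pvMainW l l.length (i + 1) [] := by
          rw [main_single l l.length i [] hi hs, pvMain_acc]
          simp
        rw [hmain, ← pvMain_unfold_run l l.length (i + 1)]
        simp
    · have hs : ¬ (i + 1 < l.length ∧ l.getD (i + 1) ' ' = '*') := by
        rintro ⟨h1, _⟩; omega
      rw [loop_done _ _ _ _ _ hi, collect_done _ _ _ _ hs, main_done _ _ _ _ hi]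
      simp

-- ===== VERDICT (by name: the statement is the Claim_ definition above) =====
theorem reduce_p_spec : Claim_equal_reduce_p := by
  intro p _
  unfold Spec_reduce_p reduce_p reduce_p_alt
  have h := bridge p.toList p.toList.length 0 [] [] (by omega)
  rw [fix_nil, cur_nil] at h
  have henc0 : pvEnc ([] : List Char) = [] := by simp [pvEnc]
  rw [henc0] at h
  simp only [List.nil_append] at h
  rw [h, pvMain_unfold_run,
    pvMain_fuel_eq p.toList p.toList.length p.toList.length 0 [] (by omega)]
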